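-- pv_equiv track=rewrite | github.com/lolmaxlevel/itmo_labs | optimizationMethods/lab5/simplex.py | calculate_bases
-- ===== SOURCE A (Python) =====
-- def calculate_bases(a, b, c, counter):
--     bases = []
--     for x in range(len(a[0])):
--         column = [row[x] for row in a]
--         if column.count(1) == 1 and column.count(0) == len(column) - 1:
--             bases.append(column.index(1))
--         else:
--             bases.append(-1)
--     baseExists = []
--     for x in range(0, len(b)):
--         baseExists.append(False)
--     for x in range(0, len(a[0])):
--         if bases[x] > -1:
--             baseExists[bases[x]] = True
--     for x in range(0, len(b)):
--         if not baseExists[x]: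
--             c.append(1)
--             counter += 1
--             for y in range(0, len(b)):
--                 a[y].append(0)
--             a[x][len(a[0]) - 1] = 1
--             bases.append(x)
--     return bases
-- ===== SOURCE B (Python) =====
-- def _step(s, v, i):
--     # per-column state (one, ok): one = row of the sole 1 seen so far (-1 if none),
--     # ok = column still a candidate unit column
--     one, ok = s
--     if v == 1:
--         return (i, ok) if one == -1 else (one, False)
--     if v == 0:
--         return (one, ok)
--     return (one, False)
--
-- def calculate_bases(a, b, c, counter):
--     # single row-major pass: fold every row into a list of per-column states
--     m = len(a[0])
--     state = [(-1, True)] * m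
--     for i, row in enumerate(a):
--         state = [_step(s, v, i) for s, v in zip(state, row)]
--     bases = [one if ok else -1 for one, ok in state]
--     missing = [r for r in range(len(b)) if r not in bases]
--     for r in missing:
--         c.append(1)
--         counter += 1
--         for row in a:
--             row.append(0)
--         a[r][-1] = 1
--     return bases + missing
-- ===== Notes on version B (the rewrite author's own statement) =====
-- stated objective: alternative
-- what changed: B transposes the traversal: instead of A's column-by-column extraction with count/count/index scans plus a baseExists boolean array and a rescan pass, B makes a single row-major pass folding each row into a list of per-column (row-of-sole-1, still-candidate) state pairs via zip, derives bases from the final states, and computes the missing rows by direct membership in bases, then returns bases + missing.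
import Mathlib
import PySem

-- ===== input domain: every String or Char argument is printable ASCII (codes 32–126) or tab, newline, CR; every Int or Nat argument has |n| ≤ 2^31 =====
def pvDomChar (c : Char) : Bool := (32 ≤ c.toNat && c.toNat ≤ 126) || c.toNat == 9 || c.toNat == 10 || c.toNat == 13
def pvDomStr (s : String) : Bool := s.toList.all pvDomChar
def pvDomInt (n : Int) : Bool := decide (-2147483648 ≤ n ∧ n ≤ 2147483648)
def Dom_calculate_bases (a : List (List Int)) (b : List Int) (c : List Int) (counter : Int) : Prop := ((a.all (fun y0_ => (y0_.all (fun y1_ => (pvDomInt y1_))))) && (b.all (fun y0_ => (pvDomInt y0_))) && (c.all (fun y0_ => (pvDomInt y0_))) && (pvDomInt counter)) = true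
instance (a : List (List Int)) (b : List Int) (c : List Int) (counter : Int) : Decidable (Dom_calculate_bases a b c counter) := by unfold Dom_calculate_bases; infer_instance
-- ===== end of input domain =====

-- B transposes the traversal: one row-major pass folding each row into per-column (row-of-sole-1,
-- still-candidate) states via zip, then bases from the states and the missing rows by membership
-- in bases (objective: alternative). Both Pythons mutate `a` and `c` in place; the equivalence
-- proved here is about the RETURN value only (A extends only the first len(b) rows of `a`, B
-- appends a full column — the returned list is the same).

-- ===== PORT A =====
def calculate_bases (a : List (List Int)) (b : List Int) (c : List Int) (counter : Int) : List Int :=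
  -- bases = []; for x in range(len(a[0])): ...
  let w : Nat := ((PySem.List.pyGet? a 0).getD []).length  -- len(a[0]); a = [] raises (excluded by Pre_)
  let bases : List Int := List.foldl (fun bases x =>
      let column := a.map (fun row => PySem.List.pyGetD row x 0)  -- row[x]; short rows raise (excluded by Pre_)
      if PySem.List.count column 1 = 1 ∧ PySem.List.count column 0 = column.length - 1 then
        bases ++ [(((PySem.List.index? column 1).getD 0 : Nat) : Int)]
      else
        bases ++ [(-1 : Int)]) [] (PySem.List.pyRange 0 (w : Int))
  -- baseExists = [False] * len(b) built by append
  let baseExists : List Bool := List.foldl (fun be _ => be ++ [false]) [] (PySem.List.pyRange 0 (b.length : Int))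
  -- for x in range(len(a[0])): if bases[x] > -1: baseExists[bases[x]] = True
  let baseExists : List Bool := List.foldl (fun be x =>
      if PySem.List.pyGetD bases x (-1) > -1 then
        PySem.List.pySetD be (PySem.List.pyGetD bases x (-1)) true  -- out-of-range write raises (excluded by Pre_)
      else be) baseExists (PySem.List.pyRange 0 (w : Int))
  -- for x in range(len(b)): if not baseExists[x]: mutate c, counter, a; bases.append(x)
  let st := List.foldl (fun (st : List (List Int) × List Int × Int × List Int) x =>
      if !(PySem.List.pyGetD baseExists x false) then
        let a1 := List.foldl (fun aa y => PySem.List.pySetD aa y (PySem.List.pyGetD aa y [] ++ [0])) st.1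
          (PySem.List.pyRange 0 (b.length : Int))  -- for y in range(len(b)): a[y].append(0)
        let w' : Nat := ((PySem.List.pyGet? a1 0).getD []).length  -- len(a[0]) re-read after the appends
        let a2 := PySem.List.pySetD a1 x
          (PySem.List.pySetD (PySem.List.pyGetD a1 x []) ((w' : Int) - 1) 1)  -- a[x][len(a[0]) - 1] = 1
        (a2, st.2.1 ++ [1], st.2.2.1 + 1, st.2.2.2 ++ [x])
      else st) (a, c, counter, bases) (PySem.List.pyRange 0 (b.length : Int))
  st.2.2.2

-- ===== PORT B =====
-- _step(s, v, i): advance one per-column state by one row entry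
def pvStep (s : Int × Bool) (v : Int) (i : Int) : Int × Bool :=
  if v = 1 then (if s.1 = -1 then (i, s.2) else (s.1, false))
  else if v = 0 then s
  else (s.1, false)

def calculate_bases_alt (a : List (List Int)) (b : List Int) (c : List Int) (counter : Int) : List Int :=
  let m : Nat := ((PySem.List.pyGet? a 0).getD []).length  -- len(a[0]); a = [] raises (excluded by Pre_)
  -- state = [(-1, True)] * m; for i, row in enumerate(a): state = [_step(s,v,i) for s,v in zip(state,row)]
  let state : List (Int × Bool) := List.foldl
      (fun st (p : Int × List Int) => List.zipWith (fun s v => pvStep s v p.1) st p.2)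
      (List.replicate m ((-1 : Int), true)) (PySem.List.enumerate a 0)
  -- bases = [one if ok else -1 for one, ok in state]
  let bases : List Int := state.map (fun s => if s.2 then s.1 else -1)
  -- missing = [r for r in range(len(b)) if r not in bases]
  let missing : List Int := (PySem.List.pyRange 0 (b.length : Int)).filter (fun r => !(List.elem r bases))
  -- the Python loop over missing only mutates a, c, counter in place; it does not touch the return value
  bases ++ missing

-- ===== PRECONDITION & SPEC =====
-- Pre_ is exactly the set of inputs on which the Python A returns normally: a nonempty, every row
-- at least as long as a[0] (else building a column raises IndexError), no more rows of b than of a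
-- (else the artificial-variable loop indexes a out of range), and every unit column's 1 lying in the
-- first len(b) rows (else the baseExists write raises IndexError).
def Pre_calculate_bases (a : List (List Int)) (b : List Int) (c : List Int) (counter : Int) : Prop :=
  a ≠ [] ∧ (∀ row ∈ a, (a.headD []).length ≤ row.length) ∧ b.length ≤ a.length ∧
  (∀ x ∈ List.range (a.headD []).length,
    (PySem.List.count (a.map (fun row => row.getD x 0)) 1 = 1 ∧
     PySem.List.count (a.map (fun row => row.getD x 0)) 0 = (a.map (fun row => row.getD x 0)).length - 1) →
    (PySem.List.index? (a.map (fun row => row.getD x 0)) 1).getD 0 < b.length)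
instance (a : List (List Int)) (b : List Int) (c : List Int) (counter : Int) : Decidable (Pre_calculate_bases a b c counter) := by unfold Pre_calculate_bases; infer_instance
def pvWitness_calculate_bases : List (List Int) × List Int × List Int × Int := ([[1, 0, 2], [0, 1, 3]], [4, 5], [0], 0)

def Spec_calculate_bases (a : List (List Int)) (b : List Int) (c : List Int) (counter : Int) (out : List Int) : Prop := out = calculate_bases_alt a b c counter
instance (a : List (List Int)) (b : List Int) (c : List Int) (counter : Int) (out : List Int) : Decidable (Spec_calculate_bases a b c counter out) := by unfold Spec_calculate_bases; infer_instance

-- ===== CLAIM (what is proved, stated in full; the proofs are below) =====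
def Claim_equal_calculate_bases : Prop := ∀ (a : List (List Int)) (b : List Int) (c : List Int) (counter : Int), Dom_calculate_bases a b c counter → Pre_calculate_bases a b c counter → Spec_calculate_bases a b c counter (calculate_bases a b c counter)

-- ===== LEMMAS AND PROOFS =====

-- the column at index x, and A's per-column base value
def pvCol (a : List (List Int)) (x : Int) : List Int := a.map (fun row => PySem.List.pyGetD row x 0)

def pvFA (a : List (List Int)) (x : Int) : Int :=
  if PySem.List.count (pvCol a x) 1 = 1 ∧ PySem.List.count (pvCol a x) 0 = (pvCol a x).length - 1 then
    (((PySem.List.index? (pvCol a x) 1).getD 0 : Nat) : Int)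
  else (-1 : Int)

-- reference single-column scan over (index, value) pairs; B's row-major fold is reduced to it
def pvUnitRowAux : List (Int × Int) → Int → Int
  | [], idx => idx
  | (i, v) :: rest, idx =>
    if v = 1 then
      if idx ≥ 0 then -1 else pvUnitRowAux rest i
    else if v ≠ 0 then -1
    else pvUnitRowAux rest idx

-- unitRowAux after a 1 has been seen: returns idx iff the rest is all zeros
lemma pvUnitRowAux_some (col : List Int) : ∀ (s idx : Int), 0 ≤ idx →
    pvUnitRowAux (PySem.List.enumerate col s) idx =
      if col.all (fun v => v == 0) then idx else -1 := by
  induction col with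
  | nil => intro s idx h; simp [PySem.List.enumerate_nil, pvUnitRowAux]
  | cons v rest ih =>
    intro s idx h
    rw [PySem.List.enumerate_cons]
    by_cases hv1 : v = 1
    · subst hv1
      simp [pvUnitRowAux, show idx ≥ 0 from h]
    · by_cases hv0 : v = 0
      · subst hv0
        simp [pvUnitRowAux, ih (s+1) idx h]
      · simp [pvUnitRowAux, hv1, hv0]

-- unitRowAux with no 1 seen yet computes A's count/count/index test in one pass
lemma pvUnitRowAux_none (col : List Int) : ∀ (s : Int), 0 ≤ s →
    pvUnitRowAux (PySem.List.enumerate col s) (-1) =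
      if PySem.List.count col 1 = 1 ∧ PySem.List.count col 0 = col.length - 1 then
        s + (((PySem.List.index? col 1).getD 0 : Nat) : Int)
      else (-1 : Int) := by
  induction col with
  | nil => intro s hs; simp [PySem.List.enumerate_nil, pvUnitRowAux, PySem.List.count_eq]
  | cons v rest ih =>
    intro s hs
    rw [PySem.List.enumerate_cons]
    by_cases hv1 : v = 1
    · subst hv1
      have h1 : pvUnitRowAux ((s, 1) :: PySem.List.enumerate rest (s + 1)) (-1)
          = pvUnitRowAux (PySem.List.enumerate rest (s + 1)) s := by
        simp [pvUnitRowAux]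
      rw [h1, pvUnitRowAux_some rest (s+1) s hs]
      by_cases hall : rest.all (fun v => v == 0)
      · have hz1 : List.count (1:Int) rest = 0 := by
          rw [List.count_eq_zero]
          intro hmem
          have := List.all_eq_true.mp hall 1 hmem
          simp at this
        have hz0 : List.count (0:Int) rest = rest.length := by
          rw [List.count_eq_length]
          intro b hb
          have := List.all_eq_true.mp hall b hb
          simp at this; omega
        rw [if_pos hall, if_pos]
        · rw [PySem.List.index?_cons_self]; simp
        · constructor
          · simp [PySem.List.count_eq, hz1]
          · simp [PySem.List.count_eq, hz0]
      · rw [if_neg hall, if_neg]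
        intro ⟨hc1, hc0⟩
        apply hall
        rw [PySem.List.count_eq, List.count_cons] at hc1 hc0
        simp at hc1 hc0
        have h0 : List.count (0:Int) rest = rest.length := by omega
        rw [List.count_eq_length] at h0
        rw [List.all_eq_true]
        intro x hx
        have := h0 x hx
        simp [← this]
    · by_cases hv0 : v = 0
      · subst hv0
        have h1 : pvUnitRowAux ((s, 0) :: PySem.List.enumerate rest (s + 1)) (-1)
            = pvUnitRowAux (PySem.List.enumerate rest (s + 1)) (-1) := by
          simp [pvUnitRowAux]
        rw [h1, ih (s+1) (by omega)]
        by_cases hc : PySem.List.count rest 1 = 1 ∧ PySem.List.count rest 0 = rest.length - 1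
        · obtain ⟨hc1, hc0⟩ := hc
          have hne : rest ≠ [] := by
            intro h; subst h; simp [PySem.List.count_eq] at hc1
          have hlen : 1 ≤ rest.length := List.length_pos_iff.mpr hne
          rw [if_pos ⟨hc1, hc0⟩, if_pos]
          · have hmem : (1:Int) ∈ rest := by
              rw [PySem.List.count_eq] at hc1
              exact List.count_pos_iff.mp (by omega)
            obtain ⟨k, hk⟩ := Option.isSome_iff_exists.mp ((PySem.List.index?_isSome_iff rest 1).mpr hmem)
            rw [PySem.List.index?_cons_of_ne rest (by omega), hk]
            simp; ring
          · constructor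
            · simpa [PySem.List.count_eq, List.count_cons] using hc1
            · rw [PySem.List.count_eq] at hc0 ⊢
              rw [List.count_cons]
              simp at hc0 ⊢
              omega
        · rw [if_neg hc, if_neg]
          intro ⟨hc1, hc0⟩
          apply hc
          rw [PySem.List.count_eq, List.count_cons] at hc1 hc0
          simp at hc1 hc0
          constructor
          · simpa [PySem.List.count_eq]
          · rw [PySem.List.count_eq]
            have : (1:Int) ∈ rest := by
              exact List.count_pos_iff.mp (by omega)
            have h2 : 1 ≤ rest.length := List.length_pos_iff.mpr (by rintro rfl; simp_all)
            omega
      · have h1 : pvUnitRowAux ((s, v) :: PySem.List.enumerate rest (s + 1)) (-1) = -1 := by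
          simp [pvUnitRowAux, hv1, hv0]
        rw [h1, if_neg]
        intro ⟨hc1, hc0⟩
        rw [PySem.List.count_eq, List.count_cons] at hc1 hc0
        simp [hv1, hv0] at hc1 hc0
        have h0 : List.count (0:Int) rest = rest.length := by omega
        rw [List.count_eq_length] at h0
        have hmem : (1:Int) ∈ rest := List.count_pos_iff.mp (by omega)
        have := h0 1 hmem
        omega

-- a column fold whose candidate flag has dropped stays dropped
lemma pvFoldStep_false : ∀ (l : List (Int × Int)) (one : Int),
    (List.foldl (fun s (p : Int × Int) => pvStep s p.2 p.1) (one, false) l).2 = false := by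
  intro l
  induction l with
  | nil => intro one; rfl
  | cons p rest ih =>
    intro one
    rw [List.foldl_cons]
    show (List.foldl _ (pvStep (one, false) p.2 p.1) rest).2 = false
    rw [pvStep]
    split
    · split
      · exact ih _
      · exact ih _
    · split
      · exact ih _
      · exact ih _

-- B's per-column fold equals the reference scan
lemma pvFoldStep_eq_aux : ∀ (l : List (Int × Int)) (one : Int), (one = -1 ∨ 0 ≤ one) →
    (∀ p ∈ l, 0 ≤ p.1) →
    (let r := List.foldl (fun s (p : Int × Int) => pvStep s p.2 p.1) (one, true) l;
     if r.2 then r.1 else -1) = pvUnitRowAux l one := by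
  intro l
  induction l with
  | nil =>
    intro one _ _
    simp [pvUnitRowAux]
  | cons p rest ih =>
    intro one hone hpos
    obtain ⟨i, v⟩ := p
    rw [List.foldl_cons]
    by_cases hv1 : v = 1
    · subst hv1
      by_cases h1 : one = -1
      · subst h1
        have hstep : pvStep ((-1 : Int), true) 1 i = (i, true) := by simp [pvStep]
        have hrhs : pvUnitRowAux ((i, 1) :: rest) (-1) = pvUnitRowAux rest i := by
          simp [pvUnitRowAux]
        rw [hstep, hrhs]
        exact ih i (Or.inr (hpos (i, 1) List.mem_cons_self))
          (fun q hq => hpos q (List.mem_cons_of_mem _ hq))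
      · have hge : 0 ≤ one := hone.resolve_left h1
        have hstep : pvStep (one, true) 1 i = (one, false) := by simp [pvStep, h1]
        have hrhs : pvUnitRowAux ((i, 1) :: rest) one = -1 := by
          simp [pvUnitRowAux, show one ≥ 0 from hge]
        rw [hstep, hrhs]
        simp [pvFoldStep_false rest one]
    · by_cases hv0 : v = 0
      · subst hv0
        have hstep : pvStep (one, true) 0 i = (one, true) := by simp [pvStep]
        have hrhs : pvUnitRowAux ((i, 0) :: rest) one = pvUnitRowAux rest one := by
          simp [pvUnitRowAux]
        rw [hstep, hrhs]
        exact ih one hone (fun q hq => hpos q (List.mem_cons_of_mem _ hq))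
      · have hstep : pvStep (one, true) v i = (one, false) := by simp [pvStep, hv1, hv0]
        have hrhs : pvUnitRowAux ((i, v) :: rest) one = -1 := by
          simp [pvUnitRowAux, hv1, hv0]
        rw [hstep, hrhs]
        simp [pvFoldStep_false rest one]

-- a list is the table of its getD values
lemma pvSelfTable {α : Type} (l : List α) (d : α) :
    l = (List.range l.length).map (fun x => l.getD x d) := by
  apply List.ext_getElem
  · simp
  · intro i h1 h2
    simp only [List.getElem_map, List.getElem_range]
    rw [List.getD_eq_getElem _ _ h1]

-- enumerate commutes with map on the values
lemma pvEnumMap {α β : Type} (f : α → β) (l : List α) : ∀ (s : Int),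
    PySem.List.enumerate (l.map f) s = (PySem.List.enumerate l s).map (fun p => (p.1, f p.2)) := by
  induction l with
  | nil => intro s; simp [PySem.List.enumerate_nil]
  | cons x rest ih =>
    intro s
    rw [List.map_cons, PySem.List.enumerate_cons, PySem.List.enumerate_cons, List.map_cons, ih]

-- the row-major zipWith fold computed pointwise: entry x is the fold over column x
lemma pvZipFold : ∀ (rows : List (Int × List Int)) (st : List (Int × Bool)),
    (∀ p ∈ rows, st.length ≤ p.2.length) →
    List.foldl (fun st (p : Int × List Int) => List.zipWith (fun s v => pvStep s v p.1) st p.2) st rows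
      = (List.range st.length).map (fun x =>
          List.foldl (fun s (p : Int × Int) => pvStep s p.2 p.1) (st.getD x ((-1 : Int), true))
            (rows.map (fun p => (p.1, p.2.getD x 0)))) := by
  intro rows
  induction rows with
  | nil =>
    intro st _
    simpa using pvSelfTable st ((-1 : Int), true)
  | cons q rest ih =>
    intro st hlen
    rw [List.foldl_cons]
    have hq : st.length ≤ q.2.length := hlen q List.mem_cons_self
    have hlen' : (List.zipWith (fun s v => pvStep s v q.1) st q.2).length = st.length := by
      rw [List.length_zipWith]; omega
    rw [ih _ (by intro p hp; rw [hlen']; exact hlen p (List.mem_cons_of_mem _ hp))]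
    rw [hlen']
    apply List.map_congr_left
    intro x hx
    rw [List.mem_range] at hx
    have hzget : (List.zipWith (fun s v => pvStep s v q.1) st q.2).getD x ((-1 : Int), true)
        = pvStep (st.getD x ((-1 : Int), true)) (q.2.getD x 0) q.1 := by
      have hx2 : x < q.2.length := by omega
      rw [List.getD_eq_getElem _ _ (by omega : x < (List.zipWith (fun s v => pvStep s v q.1) st q.2).length)]
      rw [List.getElem_zipWith]
      rw [List.getD_eq_getElem st _ hx, List.getD_eq_getElem q.2 _ hx2]
    rw [List.map_cons, List.foldl_cons, hzget]

-- the final append loop only reads x and the fixed condition: project away a/c/counter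
lemma pvProj4 (p : Int → Bool)
    (F : (List (List Int) × List Int × Int × List Int) → Int → (List (List Int) × List Int × Int × List Int))
    (hF : ∀ st x, (F st x).2.2.2 = if p x then st.2.2.2 ++ [x] else st.2.2.2) :
    ∀ (l : List Int) st, (List.foldl F st l).2.2.2
      = st.2.2.2 ++ (l.filter p) := by
  intro l
  induction l with
  | nil => intro st; simp
  | cons e rest ih =>
    intro st
    rw [List.foldl_cons, ih, hF]
    by_cases hp : p e <;> simp [hp]

lemma pvSetfold_getD (l : List Int) : ∀ (be : List Bool) (r : Nat), r < be.length →
    (∀ e ∈ l, -1 < e → e < (be.length : Int)) →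
    PySem.List.pyGetD (List.foldl (fun be bx => if bx > -1 then PySem.List.pySetD be bx true else be) be l)
        ((r : Nat) : Int) false
      = (PySem.List.pyGetD be ((r : Nat) : Int) false || decide (((r : Nat) : Int) ∈ l)) := by
  induction l with
  | nil => intro be r hr hb; simp
  | cons e rest ih =>
    intro be r hr hb
    rw [List.foldl_cons]
    by_cases he : e > -1
    · have he0 : 0 ≤ e := by omega
      have helt : e < (be.length : Int) := hb e (List.mem_cons_self) he
      have heq : e = ((e.toNat : Nat) : Int) := by omega
      have hlt : e.toNat < be.length := by omega
      rw [if_pos he]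
      rw [ih (PySem.List.pySetD be e true) r (by rw [PySem.List.length_pySetD]; exact hr)
        (by intro x hx hx2; rw [PySem.List.length_pySetD]; exact hb x (List.mem_cons_of_mem _ hx) hx2)]
      rw [heq, PySem.List.pyGetD_pySetD_natCast be e.toNat r true false hlt]
      by_cases hre : r = e.toNat
      · subst hre; simp [← heq]
      · have : ((r : Nat) : Int) ≠ e := by omega
        simp [this, hre, max_eq_left he0]
    · rw [if_neg he]
      rw [ih be r hr (fun x hx hx2 => hb x (List.mem_cons_of_mem _ hx) hx2)]
      have : ((r : Nat) : Int) ≠ e := by omega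
      simp [this]

lemma pvGetD_replicate_false (n : Nat) (i : Int) :
    PySem.List.pyGetD (List.replicate n false) i false = false := by
  by_cases h : PySem.Raise.InRange (List.replicate n false).length i
  · exact List.eq_of_mem_replicate (PySem.List.pyGetD_mem _ false h)
  · exact PySem.List.pyGetD_of_none _ _ _ ((PySem.List.pyGet?_eq_none_iff (List.replicate n false) i).mpr h)

-- A's result, characterized: the per-column values followed by the filtered missing rows
lemma portA_char (a : List (List Int)) (b : List Int) (c : List Int) (counter : Int) :
    calculate_bases a b c counter =
      ((PySem.List.pyRange 0 ((((PySem.List.pyGet? a 0).getD []).length : Nat) : Int)).map (pvFA a))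
      ++ (PySem.List.pyRange 0 ((b.length : Nat) : Int)).filter (fun x =>
          !(PySem.List.pyGetD
              (((PySem.List.pyRange 0 ((((PySem.List.pyGet? a 0).getD []).length : Nat) : Int)).map (pvFA a)).foldl
                (fun (be : List Bool) (bx : Int) => if bx > -1 then PySem.List.pySetD be bx true else be) (List.replicate b.length false)) x false)) := by
  simp only [calculate_bases]
  have hstep : (fun (bases : List Int) (x : Int) =>
      let column := a.map (fun row => PySem.List.pyGetD row x 0)
      if PySem.List.count column 1 = 1 ∧ PySem.List.count column 0 = column.length - 1 then
        bases ++ [(((PySem.List.index? column 1).getD 0 : Nat) : Int)]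
      else
        bases ++ [(-1 : Int)])
      = (fun bs x => bs ++ [pvFA a x]) := by
    funext bs x
    simp only [pvFA, pvCol]
    split <;> rfl
  rw [hstep, PySem.List.foldl_append_singleton_eq_map]
  have hinit : List.foldl (fun (be : List Bool) (_ : Int) => be ++ [false]) [] (PySem.List.pyRange 0 (b.length : Int))
      = List.replicate b.length false := by
    rw [PySem.List.foldl_append_singleton_eq_map (fun _ => false)]
    simp [List.map_const', PySem.List.length_pyRange_one]
  rw [hinit]
  simp only [List.nil_append]
  generalize hM : (PySem.List.pyRange 0 ((((PySem.List.pyGet? a 0).getD []).length : Nat) : Int)).map (pvFA a) = M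
  have hlenM : ((((PySem.List.pyGet? a 0).getD []).length : Nat) : Int) = PySem.List.len M := by
    rw [← hM]
    simp [PySem.List.length_pyRange_one]
  rw [hlenM]
  have h2 : (fun (be : List Bool) (x : Int) =>
      if PySem.List.pyGetD M x (-1) > -1 then PySem.List.pySetD be (PySem.List.pyGetD M x (-1)) true else be)
      = (fun acc j => (fun (be : List Bool) (bx : Int) => if bx > -1 then PySem.List.pySetD be bx true else be) acc (PySem.List.pyGetD M j (-1))) := rfl
  rw [h2, PySem.List.foldl_pyRange_zero_pyGetD M (-1) (fun (be : List Bool) (bx : Int) => if bx > -1 then PySem.List.pySetD be bx true else be)]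
  rw [pvProj4 (fun x => !(PySem.List.pyGetD (List.foldl (fun (be : List Bool) (bx : Int) => if bx > -1 then PySem.List.pySetD be bx true else be) (List.replicate b.length false) M) x false)) _
    (by intro st x; dsimp only; split <;> rfl)]

-- B's bases list equals A's per-column values, under Pre_
lemma portB_bases (a : List (List Int)) (hne : a ≠ [])
    (hrect : ∀ row ∈ a, (a.headD []).length ≤ row.length) :
    (List.foldl (fun st (p : Int × List Int) => List.zipWith (fun s v => pvStep s v p.1) st p.2)
        (List.replicate ((PySem.List.pyGet? a 0).getD []).length ((-1 : Int), true))
        (PySem.List.enumerate a 0)).map (fun s => if s.2 then s.1 else -1)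
      = (PySem.List.pyRange 0 ((((PySem.List.pyGet? a 0).getD []).length : Nat) : Int)).map (pvFA a) := by
  have hh : (PySem.List.pyGet? a 0).getD [] = a.headD [] := by
    cases a with
    | nil => rfl
    | cons h t => rw [PySem.List.pyGet?_zero_cons]; rfl
  set m : Nat := ((PySem.List.pyGet? a 0).getD []).length with hm
  have hrows : ∀ p ∈ PySem.List.enumerate a 0, (List.replicate m ((-1 : Int), true)).length ≤ p.2.length := by
    intro p hp
    obtain ⟨k, hk, rfl⟩ := (PySem.List.mem_enumerate_iff _ _ _).mp hp
    simp only [List.length_replicate]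
    rw [hm, hh]
    exact hrect _ (List.getElem_mem hk)
  rw [pvZipFold _ _ hrows]
  rw [List.length_replicate, List.map_map]
  rw [PySem.List.pyRange_one]
  simp only [Int.sub_zero, Int.toNat_natCast, List.map_map]
  apply List.map_congr_left
  intro x hx
  rw [List.mem_range] at hx
  simp only [Function.comp]
  rw [show (List.replicate m ((-1 : Int), true)).getD x ((-1 : Int), true) = ((-1 : Int), true) from
    List.getD_replicate _ (by omega)]
  -- left side: the per-column fold at column x
  have hcolmap : (PySem.List.enumerate a 0).map (fun p => (p.1, p.2.getD x 0))
      = PySem.List.enumerate (a.map (fun row => row.getD x 0)) 0 :=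
      (pvEnumMap (fun row : List Int => row.getD x 0) a 0).symm
  rw [hcolmap]
  have hidx : ∀ p ∈ PySem.List.enumerate (a.map (fun row => row.getD x 0)) 0, 0 ≤ p.1 := by
    intro p hp
    obtain ⟨k, hk, rfl⟩ := (PySem.List.mem_enumerate_iff _ _ _).mp hp
    simp
  have := pvFoldStep_eq_aux (PySem.List.enumerate (a.map (fun row => row.getD x 0)) 0) (-1) (Or.inl rfl) hidx
  simp only at this
  rw [this, pvUnitRowAux_none _ 0 le_rfl]
  -- right side: pvFA at (0 + x)
  have hcol : pvCol a (0 + (x : Int)) = a.map (fun row => row.getD x 0) := by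
    rw [pvCol]
    apply List.map_congr_left
    intro row _
    rw [Int.zero_add]
    rw [PySem.List.pyGetD_natCast]
  rw [pvFA, hcol]
  split <;> simp

theorem calculate_bases_spec : Claim_equal_calculate_bases := by
  intro a b c counter _ hpre
  obtain ⟨hne, hrect, hble, hunit⟩ := hpre
  show calculate_bases a b c counter = calculate_bases_alt a b c counter
  rw [portA_char]
  simp only [calculate_bases_alt]
  rw [portB_bases a hne hrect]
  set M := (PySem.List.pyRange 0 ((((PySem.List.pyGet? a 0).getD []).length : Nat) : Int)).map (pvFA a) with hMdef
  congr 1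
  have hh : (PySem.List.pyGet? a 0).getD [] = a.headD [] := by
    cases a with
    | nil => rfl
    | cons h t => rw [PySem.List.pyGet?_zero_cons]; rfl
  have hbound : ∀ e ∈ M, -1 < e → e < ((b.length : Nat) : Int) := by
    intro e heM hpos
    obtain ⟨x', hx', rfl⟩ := List.mem_map.mp heM
    rw [PySem.List.mem_pyRange_one] at hx'
    rw [hh] at hx'
    have hxe' : x' = ((x'.toNat : Nat) : Int) := by omega
    have hcoleq : pvCol a x' = a.map (fun row => row.getD x'.toNat 0) := by
      rw [pvCol]
      apply List.map_congr_left
      intro row _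
      rw [hxe', PySem.List.pyGetD_natCast]
      simp [max_eq_left hx'.1]
    rw [pvFA, hcoleq] at hpos ⊢
    by_cases hcond : PySem.List.count (a.map (fun row => row.getD x'.toNat 0)) 1 = 1 ∧
        PySem.List.count (a.map (fun row => row.getD x'.toNat 0)) 0 = (a.map (fun row => row.getD x'.toNat 0)).length - 1
    · rw [if_pos hcond] at hpos ⊢
      have := hunit x'.toNat (List.mem_range.mpr (by omega)) hcond
      omega
    · rw [if_neg hcond] at hpos
      omega
  apply List.filter_congr
  intro x hx
  rw [PySem.List.mem_pyRange_one] at hx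
  obtain ⟨hx0, hxlt⟩ := hx
  congr 1
  have hxe : x = ((x.toNat : Nat) : Int) := by omega
  rw [hxe]
  rw [pvSetfold_getD M (List.replicate b.length false) x.toNat
    (by simp; omega) (by simpa using hbound)]
  rw [pvGetD_replicate_false]
  simp only [Bool.false_or]
  rw [← hxe]
  rw [List.elem_eq_mem]
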